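-- pv_equiv track=rewrite | github.com/liangxuCHEN/package_function | package_tools.py | is_valid_empty_section
-- ===== SOURCE A (Python) =====
-- def is_valid_empty_section(empty_sections):
--     # TODO: 参数调整预料判断
--     min_size = 200000    # 面积 0.2 m^2
--     min_height = 58      # 最小边长 58 mm
--     total_ares = 0
--     res_empty_section = list()
--     for sections in empty_sections:
--         section_list = list()
--         for section in sections:
--             if section[2] * section[3] > min_size and min(section[2], section[3]) > min_height:
--                 section_list.append(section)
--                 total_ares += section[2] * section[3]
--
--         res_empty_section.append(section_list)
--
--     return res_empty_section, total_ares
-- ===== SOURCE B (Python) =====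
-- def _inner(sections):
--     # recurse on the tail, then decide about the head: builds the kept list
--     # and its area total back-to-front
--     if not sections:
--         return [], 0
--     kept, t = _inner(sections[1:])
--     s = sections[0]
--     area = s[2] * s[3]
--     if area > 200000 and min(s[2], s[3]) > 58:
--         return [s] + kept, area + t
--     return kept, t
--
--
-- def _outer(empty_sections):
--     if not empty_sections:
--         return [], 0
--     rest, rest_total = _outer(empty_sections[1:])
--     kept, t = _inner(empty_sections[0])
--     return [kept] + rest, t + rest_total
--
--
-- def is_valid_empty_section(empty_sections):
--     return _outer(empty_sections)
-- ===== Notes on version B (the rewrite author's own statement) =====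
-- stated objective: alternative
-- what changed: Replaces A's iterative accumulator loops with structural recursion: two mutually independent recursive helpers process the lists back-to-front, combining each head with the recursively computed (filtered tail, tail total) pair instead of threading a running total forward.
import Mathlib
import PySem

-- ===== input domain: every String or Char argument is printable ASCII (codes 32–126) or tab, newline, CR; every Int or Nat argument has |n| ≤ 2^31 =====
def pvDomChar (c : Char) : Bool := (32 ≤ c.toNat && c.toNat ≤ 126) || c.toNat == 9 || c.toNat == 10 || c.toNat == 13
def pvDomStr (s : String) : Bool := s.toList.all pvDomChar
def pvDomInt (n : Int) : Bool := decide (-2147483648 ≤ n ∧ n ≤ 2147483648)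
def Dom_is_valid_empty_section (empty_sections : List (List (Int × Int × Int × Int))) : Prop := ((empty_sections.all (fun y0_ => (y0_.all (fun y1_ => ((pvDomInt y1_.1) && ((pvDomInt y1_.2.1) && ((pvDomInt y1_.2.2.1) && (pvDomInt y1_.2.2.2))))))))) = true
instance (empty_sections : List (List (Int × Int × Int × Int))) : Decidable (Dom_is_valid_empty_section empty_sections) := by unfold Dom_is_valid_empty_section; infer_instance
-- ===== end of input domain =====

-- B replaces A's iterative accumulator loops with back-to-front structural recursion; objective: alternative.


-- ===== PORT A =====
def is_valid_empty_section (empty_sections : List (List (Int × Int × Int × Int))) : (List (List (Int × Int × Int × Int))) × Int :=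
  -- fused loop: for each inner list, filter and accumulate total_ares in the same pass
  let r := empty_sections.foldl
    (fun (acc : List (List (Int × Int × Int × Int)) × Int) sections =>
      let inner := sections.foldl
        (fun (st : List (Int × Int × Int × Int) × Int) sec =>
          if sec.2.2.1 * sec.2.2.2 > 200000 ∧ min sec.2.2.1 sec.2.2.2 > 58 then
            (st.1 ++ [sec], st.2 + sec.2.2.1 * sec.2.2.2)
          else st)
        ([], acc.2)
      (acc.1 ++ [inner.1], inner.2))
    ([], 0)
  r

-- ===== PORT B =====
-- B: structural recursion, back-to-front: combine the head with the recursive result on the tail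
def pvInner (sections : List (Int × Int × Int × Int)) : (List (Int × Int × Int × Int)) × Int :=
  match sections with
  | [] => ([], 0)
  | s :: rest =>
    let kt := pvInner rest
    let area := s.2.2.1 * s.2.2.2
    if area > 200000 ∧ min s.2.2.1 s.2.2.2 > 58 then
      (s :: kt.1, area + kt.2)
    else kt

def pvOuter (empty_sections : List (List (Int × Int × Int × Int))) : (List (List (Int × Int × Int × Int))) × Int :=
  match empty_sections with
  | [] => ([], 0)
  | sec :: rest =>
    let rr := pvOuter rest
    let kt := pvInner sec
    (kt.1 :: rr.1, kt.2 + rr.2)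

def is_valid_empty_section_alt (empty_sections : List (List (Int × Int × Int × Int))) : (List (List (Int × Int × Int × Int))) × Int :=
  pvOuter empty_sections

-- ===== PRECONDITION & SPEC =====
def Spec_is_valid_empty_section (empty_sections : List (List (Int × Int × Int × Int))) (out : (List (List (Int × Int × Int × Int))) × Int) : Prop := out = is_valid_empty_section_alt empty_sections
instance (empty_sections : List (List (Int × Int × Int × Int))) (out : (List (List (Int × Int × Int × Int))) × Int) : Decidable (Spec_is_valid_empty_section empty_sections out) := by unfold Spec_is_valid_empty_section; infer_instance

-- ===== CLAIM =====
def Claim_equal_is_valid_empty_section : Prop := ∀ (empty_sections : List (List (Int × Int × Int × Int))), Dom_is_valid_empty_section empty_sections → Spec_is_valid_empty_section empty_sections (is_valid_empty_section empty_sections)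

-- ===== LEMMAS AND PROOFS =====

lemma inner_eq (sections : List (Int × Int × Int × Int)) (l : List (Int × Int × Int × Int)) (t : Int) :
    sections.foldl
      (fun (st : List (Int × Int × Int × Int) × Int) sec =>
        if sec.2.2.1 * sec.2.2.2 > 200000 ∧ min sec.2.2.1 sec.2.2.2 > 58 then
          (st.1 ++ [sec], st.2 + sec.2.2.1 * sec.2.2.2)
        else st) (l, t)
    = (l ++ (pvInner sections).1, t + (pvInner sections).2) := by
  induction sections generalizing l t with
  | nil => simp [pvInner]
  | cons s rest ih =>
    simp only [List.foldl_cons, pvInner]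
    by_cases h : s.2.2.1 * s.2.2.2 > 200000 ∧ min s.2.2.1 s.2.2.2 > 58
    · rw [if_pos h, if_pos h, ih]
      simp [List.append_assoc]
      ring
    · rw [if_neg h, if_neg h, ih]

lemma outer_eq (es : List (List (Int × Int × Int × Int)))
    (p : List (List (Int × Int × Int × Int)) × Int) :
    es.foldl
      (fun (acc : List (List (Int × Int × Int × Int)) × Int) sections =>
        let inner := sections.foldl
          (fun (st : List (Int × Int × Int × Int) × Int) sec =>
            if sec.2.2.1 * sec.2.2.2 > 200000 ∧ min sec.2.2.1 sec.2.2.2 > 58 then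
              (st.1 ++ [sec], st.2 + sec.2.2.1 * sec.2.2.2)
            else st) ([], acc.2)
        (acc.1 ++ [inner.1], inner.2)) p
    = (p.1 ++ (pvOuter es).1, p.2 + (pvOuter es).2) := by
  induction es generalizing p with
  | nil => simp [pvOuter]
  | cons sec rest ih =>
    rw [List.foldl_cons, ih]
    simp only [inner_eq, List.nil_append, pvOuter, List.append_assoc, List.singleton_append]
    rw [add_assoc]

-- ===== VERDICT =====
theorem is_valid_empty_section_spec : Claim_equal_is_valid_empty_section := by
  intro es _
  unfold Spec_is_valid_empty_section is_valid_empty_section is_valid_empty_section_alt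
  simp only [outer_eq, List.nil_append, zero_add]
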